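-- pv_equiv track=rewrite | github.com/raeez/chiral-bar-cobar | compute/lib/mv_positivity_sl3.py | weyl_orbit
-- ===== SOURCE A (Python) =====
-- from typing import Dict, List, Optional, Tuple
--
-- def weyl_reflect_s1(a: int, b: int) -> Tuple[int, int]:
--     """Simple reflection s₁: sᵢ(λ) = λ - ⟨λ, αᵢ⟩αᵢ in Dynkin coords."""
--     return (-a, a + b)
--
-- def weyl_reflect_s2(a: int, b: int) -> Tuple[int, int]:
--     """Simple reflection s₂."""
--     return (a + b, -b)
--
-- def weyl_orbit(a: int, b: int) -> List[Tuple[int, int]]: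
--     """Full Weyl orbit of (a, b) under S₃ action on Dynkin labels."""
--     orbit = set()
--     # Generate by applying s₁ and s₂ iteratively
--     queue = [(a, b)]
--     while queue:
--         pt = queue.pop()
--         if pt in orbit:
--             continue
--         orbit.add(pt)
--         p, q = pt
--         queue.append(weyl_reflect_s1(p, q))
--         queue.append(weyl_reflect_s2(p, q))
--     return sorted(orbit)
-- ===== SOURCE B (Python) =====
-- def weyl_orbit(a, b):
--     """Full Weyl orbit of (a, b) under S3: the six group images in closed form."""
--     return sorted({(a, b), (-a, a + b), (a + b, -b), (-a - b, a), (b, -a - b), (-b, -a)})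
-- ===== Notes on version B (the rewrite author's own statement) =====
-- stated objective: simpler
-- what changed: Replaces the worklist/BFS closure under the two simple reflections by a one-shot closed-form enumeration of the six S3 images of (a,b), deduplicated by a set literal and sorted.
import Mathlib
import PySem

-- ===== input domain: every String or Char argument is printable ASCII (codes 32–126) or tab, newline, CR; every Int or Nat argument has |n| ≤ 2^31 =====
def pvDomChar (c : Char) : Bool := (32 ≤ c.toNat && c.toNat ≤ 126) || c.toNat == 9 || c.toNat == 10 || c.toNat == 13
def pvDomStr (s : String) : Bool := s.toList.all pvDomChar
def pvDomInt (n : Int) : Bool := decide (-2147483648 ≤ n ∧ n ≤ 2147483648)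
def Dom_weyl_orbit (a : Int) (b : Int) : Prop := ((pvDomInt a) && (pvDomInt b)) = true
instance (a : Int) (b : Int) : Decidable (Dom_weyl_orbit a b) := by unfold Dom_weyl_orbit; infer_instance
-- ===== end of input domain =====

-- B replaces A's worklist closure under s₁/s₂ by a one-shot closed-form enumeration of the
-- six S₃ images of (a,b) (objective: simpler).

-- ===== PORT A =====
def weyl_reflect_s1 (a : Int) (b : Int) : Int × Int := (-a, a + b)

def weyl_reflect_s2 (a : Int) (b : Int) : Int × Int := (a + b, -b)

-- The while-loop of A. The queue is kept top-of-stack-first (Python's queue.pop() takes the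
-- last element, so 'append s1; append s2' makes s2 the next pop: here 's2 :: s1 :: rest').
-- The fuel argument only makes the recursion structural: 13 steps always suffice (the orbit
-- has at most 6 points, each insertion adds 2 queue entries; proved in weylLoop_main below),
-- so the loop always ends with an empty queue, exactly like the Python while-loop.
def weylLoop : Nat → PySem.Set (Int × Int) → List (Int × Int) → PySem.Set (Int × Int)
  | 0, orbit, _ => orbit
  | _ + 1, orbit, [] => orbit
  | fuel + 1, orbit, pt :: rest =>
    if orbit.contains pt then
      weylLoop fuel orbit rest
    else
      weylLoop fuel (orbit.add pt)
        (weyl_reflect_s2 pt.1 pt.2 :: weyl_reflect_s1 pt.1 pt.2 :: rest)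

def weyl_orbit (a : Int) (b : Int) : List (Int × Int) :=
  PySem.List.sorted2 (weylLoop 13 PySem.Set.empty [(a, b)]) Prod.fst Prod.snd false

-- ===== PORT B =====
def weyl_orbit_alt (a : Int) (b : Int) : List (Int × Int) :=
  PySem.List.sorted2
    (PySem.Set.ofList [(a, b), (-a, a + b), (a + b, -b), (-a - b, a), (b, -a - b), (-b, -a)])
    Prod.fst Prod.snd false

-- ===== PRECONDITION & SPEC =====
def Spec_weyl_orbit (a : Int) (b : Int) (out : List (Int × Int)) : Prop := out = weyl_orbit_alt a b
instance (a : Int) (b : Int) (out : List (Int × Int)) : Decidable (Spec_weyl_orbit a b out) := by unfold Spec_weyl_orbit; infer_instance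

-- ===== CLAIM (what is proved, stated in full; the proofs are below) =====
def Claim_equal_weyl_orbit : Prop := ∀ (a : Int) (b : Int), Dom_weyl_orbit a b → Spec_weyl_orbit a b (weyl_orbit a b)

-- ===== LEMMAS AND PROOFS =====

-- Python's tuple comparison (sorted2 with keys fst/snd), as a Bool.
def lexLt (x y : Int × Int) : Bool :=
  decide (x.1 < y.1) || (!decide (y.1 < x.1) && decide (x.2 < y.2))

theorem lexLt_true_iff (x y : Int × Int) :
    lexLt x y = true ↔ (x.1 < y.1 ∨ (x.1 = y.1 ∧ x.2 < y.2)) := by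
  simp [lexLt]; omega

theorem sorted2_eq_foldl (xs : List (Int × Int)) :
    PySem.List.sorted2 xs Prod.fst Prod.snd false =
      xs.foldl (fun acc x => PySem.List.insertBy lexLt x acc) [] := rfl

theorem insertBy_lex_pairwise (x : Int × Int) :
    ∀ (ys : List (Int × Int)), ys.Pairwise (fun a b => lexLt b a = false) →
      (PySem.List.insertBy lexLt x ys).Pairwise (fun a b => lexLt b a = false) := by
  intro ys
  induction ys with
  | nil =>
    intro _
    simp [PySem.List.insertBy]
  | cons y t ih =>
    intro h
    rw [List.pairwise_cons] at h
    rw [PySem.List.insertBy.eq_2]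
    by_cases hxy : lexLt x y = true
    · rw [if_pos hxy]
      refine List.pairwise_cons.mpr ⟨?_, List.pairwise_cons.mpr ⟨h.1, h.2⟩⟩
      intro z hz
      rw [List.mem_cons] at hz
      rw [lexLt_true_iff] at hxy
      have step : ∀ z' : Int × Int, (¬ (lexLt z' x = true)) → lexLt z' x = false := by
        intro z' h'; cases hzx : lexLt z' x
        · rfl
        · exact absurd hzx h'
      rcases hz with hz | hz
      · subst hz
        apply step
        rw [lexLt_true_iff]
        omega
      · have hyz := h.1 z hz
        have hzy : ¬ (lexLt z y = true) := by simp [hyz]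
        rw [lexLt_true_iff] at hzy
        apply step
        rw [lexLt_true_iff]
        omega
    · rw [if_neg hxy]
      refine List.pairwise_cons.mpr ⟨?_, ih h.2⟩
      intro z hz
      rw [PySem.List.mem_insertBy] at hz
      rcases hz with hz | hz
      · subst hz; simpa using hxy
      · exact h.1 z hz

theorem foldl_insertBy_pairwise (xs : List (Int × Int)) :
    ∀ (acc : List (Int × Int)), acc.Pairwise (fun a b => lexLt b a = false) →
      (xs.foldl (fun acc x => PySem.List.insertBy lexLt x acc) acc).Pairwise
        (fun a b => lexLt b a = false) := by
  induction xs with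
  | nil => intro acc h; simpa using h
  | cons x t ih =>
    intro acc h
    exact ih _ (insertBy_lex_pairwise x acc h)

-- Key fact: on lists without duplicates, sorted2 (Python's sorted of pairs) depends only on
-- the multiset of elements.
theorem sorted2_eq_of_perm (xs ys : List (Int × Int)) (hp : xs.Perm ys) (hx : xs.Nodup) :
    PySem.List.sorted2 xs Prod.fst Prod.snd false =
      PySem.List.sorted2 ys Prod.fst Prod.snd false := by
  have pxs : (PySem.List.sorted2 xs Prod.fst Prod.snd false).Perm xs :=
    PySem.List.sorted2_perm xs _ _ false
  have pys : (PySem.List.sorted2 ys Prod.fst Prod.snd false).Perm ys :=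
    PySem.List.sorted2_perm ys _ _ false
  have hperm : (PySem.List.sorted2 xs Prod.fst Prod.snd false).Perm
      (PySem.List.sorted2 ys Prod.fst Prod.snd false) :=
    (pxs.trans hp).trans pys.symm
  have hnx : (PySem.List.sorted2 xs Prod.fst Prod.snd false).Nodup := pxs.symm.nodup hx
  have hny : (PySem.List.sorted2 ys Prod.fst Prod.snd false).Nodup :=
    pys.symm.nodup (hp.nodup hx)
  have wx : (PySem.List.sorted2 xs Prod.fst Prod.snd false).Pairwise
      (fun a b => lexLt b a = false) := by
    rw [sorted2_eq_foldl]; exact foldl_insertBy_pairwise xs [] (by simp)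
  have wy : (PySem.List.sorted2 ys Prod.fst Prod.snd false).Pairwise
      (fun a b => lexLt b a = false) := by
    rw [sorted2_eq_foldl]; exact foldl_insertBy_pairwise ys [] (by simp)
  refine List.Perm.eq_of_pairwise (le := fun a b => lexLt b a = false ∧ a ≠ b)
    ?_ (wx.and hnx) (wy.and hny) hperm
  · intro a b _ _ hab hba
    exfalso
    have h1 : ¬ (lexLt b a = true) := by simp [hab.1]
    have h2 : ¬ (lexLt a b = true) := by simp [hba.1]
    rw [lexLt_true_iff] at h1 h2
    apply hab.2
    have : a.1 = b.1 ∧ a.2 = b.2 := by omega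
    exact Prod.ext this.1 this.2

-- The six closed-form images of (a, b) under S₃ (B's list).
def sixList (a : Int) (b : Int) : List (Int × Int) :=
  [(a, b), (-a, a + b), (a + b, -b), (-a - b, a), (b, -a - b), (-b, -a)]

def s1pt (p : Int × Int) : Int × Int := weyl_reflect_s1 p.1 p.2
def s2pt (p : Int × Int) : Int × Int := weyl_reflect_s2 p.1 p.2

theorem mem_sixList_iff (a b : Int) (p : Int × Int) :
    p ∈ sixList a b ↔ (p = (a, b) ∨ p = (-a, a + b) ∨ p = (a + b, -b) ∨
      p = (-a - b, a) ∨ p = (b, -a - b) ∨ p = (-b, -a)) := by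
  simp [sixList]

theorem sixList_closed (a b : Int) :
    ∀ p ∈ sixList a b, s1pt p ∈ sixList a b ∧ s2pt p ∈ sixList a b := by
  intro p hp
  rw [mem_sixList_iff] at hp
  rcases hp with h | h | h | h | h | h <;> subst h <;>
    constructor <;>
    · rw [mem_sixList_iff]
      simp [s1pt, s2pt, weyl_reflect_s1, weyl_reflect_s2, Prod.mk.injEq] <;> omega

-- Worklist correctness: with enough fuel, the loop returns a duplicate-free set that
-- contains everything already collected or queued, stays inside sixList, and is closed
-- under both reflections.
theorem weylLoop_main (a b : Int) : ∀ (fuel : Nat) (orbit queue : List (Int × Int)),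
    orbit.Nodup →
    (∀ p ∈ orbit, p ∈ sixList a b) →
    (∀ p ∈ queue, p ∈ sixList a b) →
    (∀ p ∈ orbit, s1pt p ∈ orbit ∨ s1pt p ∈ queue) →
    (∀ p ∈ orbit, s2pt p ∈ orbit ∨ s2pt p ∈ queue) →
    2 * (6 - orbit.length) + queue.length ≤ fuel →
    (weylLoop fuel orbit queue).Nodup ∧
    (∀ p ∈ orbit, p ∈ weylLoop fuel orbit queue) ∧
    (∀ p ∈ queue, p ∈ weylLoop fuel orbit queue) ∧
    (∀ p ∈ weylLoop fuel orbit queue, p ∈ sixList a b) ∧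
    (∀ p ∈ weylLoop fuel orbit queue,
      s1pt p ∈ weylLoop fuel orbit queue ∧ s2pt p ∈ weylLoop fuel orbit queue) := by
  intro fuel
  induction fuel with
  | zero =>
    intro orbit queue hnd hoS hqS h1 h2 hm
    have hq : queue = [] := by
      cases queue with
      | nil => rfl
      | cons x t => simp at hm
    subst hq
    refine ⟨hnd, by simp [weylLoop], by simp, ?_, ?_⟩
    · intro p hp; exact hoS p (by simpa [weylLoop] using hp)
    · intro p hp
      have hp' : p ∈ orbit := by simpa [weylLoop] using hp
      have e1 := h1 p hp'
      have e2 := h2 p hp'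
      simp at e1 e2
      exact ⟨by simpa [weylLoop] using e1, by simpa [weylLoop] using e2⟩
  | succ fuel ih =>
    intro orbit queue hnd hoS hqS h1 h2 hm
    cases queue with
    | nil =>
      refine ⟨hnd, by simp [weylLoop], by simp, ?_, ?_⟩
      · intro p hp; exact hoS p (by simpa [weylLoop] using hp)
      · intro p hp
        have hp' : p ∈ orbit := by simpa [weylLoop] using hp
        have e1 := h1 p hp'
        have e2 := h2 p hp'
        simp at e1 e2
        exact ⟨by simpa [weylLoop] using e1, by simpa [weylLoop] using e2⟩
    | cons pt rest =>
      by_cases hc : PySem.Set.contains orbit pt = true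
      · -- skip branch
        have hmem : pt ∈ orbit := (PySem.Set.contains_iff orbit pt).mp hc
        have step : weylLoop (fuel + 1) orbit (pt :: rest) = weylLoop fuel orbit rest := by
          rw [weylLoop, if_pos hc]
        rw [step]
        have h1' : ∀ p ∈ orbit, s1pt p ∈ orbit ∨ s1pt p ∈ rest := by
          intro p hp
          rcases h1 p hp with h | h
          · exact Or.inl h
          · rcases List.mem_cons.mp h with h | h
            · exact Or.inl (h ▸ hmem)
            · exact Or.inr h
        have h2' : ∀ p ∈ orbit, s2pt p ∈ orbit ∨ s2pt p ∈ rest := by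
          intro p hp
          rcases h2 p hp with h | h
          · exact Or.inl h
          · rcases List.mem_cons.mp h with h | h
            · exact Or.inl (h ▸ hmem)
            · exact Or.inr h
        have hm' : 2 * (6 - orbit.length) + rest.length ≤ fuel := by
          simp at hm; omega
        obtain ⟨A1, A2, A3, A4, A5⟩ := ih orbit rest hnd hoS
          (fun p hp => hqS p (List.mem_cons_of_mem _ hp)) h1' h2' hm'
        refine ⟨A1, A2, ?_, A4, A5⟩
        intro p hp
        rcases List.mem_cons.mp hp with h | h
        · exact A2 _ (h ▸ hmem)
        · exact A3 p h
      · -- add branch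
        have hnmem : pt ∉ orbit := fun h => hc ((PySem.Set.contains_iff orbit pt).mpr h)
        have hadd : PySem.Set.add orbit pt = orbit ++ [pt] := by
          rw [PySem.Set.add, if_neg hc]
        have step : weylLoop (fuel + 1) orbit (pt :: rest) =
            weylLoop fuel (orbit ++ [pt]) (s2pt pt :: s1pt pt :: rest) := by
          rw [weylLoop, if_neg hc, hadd]; rfl
        rw [step]
        have hptS : pt ∈ sixList a b := hqS pt List.mem_cons_self
        have hnd' : (orbit ++ [pt]).Nodup := by
          refine hnd.append (by simp) ?_
          intro x hx hx'
          simp at hx'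
          exact hnmem (hx' ▸ hx)
        have hoS' : ∀ p ∈ orbit ++ [pt], p ∈ sixList a b := by
          intro p hp
          rcases List.mem_append.mp hp with h | h
          · exact hoS p h
          · simp at h; exact h ▸ hptS
        have hqS' : ∀ p ∈ s2pt pt :: s1pt pt :: rest, p ∈ sixList a b := by
          intro p hp
          rcases List.mem_cons.mp hp with h | hp
          · exact h ▸ (sixList_closed a b pt hptS).2
          · rcases List.mem_cons.mp hp with h | hp
            · exact h ▸ (sixList_closed a b pt hptS).1
            · exact hqS p (List.mem_cons_of_mem _ hp)
        have h1' : ∀ p ∈ orbit ++ [pt],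
            s1pt p ∈ orbit ++ [pt] ∨ s1pt p ∈ s2pt pt :: s1pt pt :: rest := by
          intro p hp
          rcases List.mem_append.mp hp with h | h
          · rcases h1 p h with h' | h'
            · exact Or.inl (List.mem_append.mpr (Or.inl h'))
            · rcases List.mem_cons.mp h' with h'' | h''
              · exact Or.inl (List.mem_append.mpr (Or.inr (by simp [h''])))
              · exact Or.inr (List.mem_cons_of_mem _ (List.mem_cons_of_mem _ h''))
          · simp at h
            subst h
            exact Or.inr (List.mem_cons_of_mem _ List.mem_cons_self)
        have h2' : ∀ p ∈ orbit ++ [pt],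
            s2pt p ∈ orbit ++ [pt] ∨ s2pt p ∈ s2pt pt :: s1pt pt :: rest := by
          intro p hp
          rcases List.mem_append.mp hp with h | h
          · rcases h2 p h with h' | h'
            · exact Or.inl (List.mem_append.mpr (Or.inl h'))
            · rcases List.mem_cons.mp h' with h'' | h''
              · exact Or.inl (List.mem_append.mpr (Or.inr (by simp [h''])))
              · exact Or.inr (List.mem_cons_of_mem _ (List.mem_cons_of_mem _ h''))
          · simp at h
            subst h
            exact Or.inr List.mem_cons_self
        have hcard : orbit.length + 1 ≤ 6 := by
          have hsub : (orbit ++ [pt]).Subperm (sixList a b) :=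
            List.subperm_of_subset hnd' hoS'
          have := hsub.length_le
          simpa [sixList] using this
        have hm' : 2 * (6 - (orbit ++ [pt]).length) + (s2pt pt :: s1pt pt :: rest).length ≤ fuel := by
          simp at hm ⊢
          omega
        obtain ⟨A1, A2, A3, A4, A5⟩ := ih (orbit ++ [pt]) (s2pt pt :: s1pt pt :: rest)
          hnd' hoS' hqS' h1' h2' hm'
        refine ⟨A1, ?_, ?_, A4, A5⟩
        · intro p hp; exact A2 p (List.mem_append.mpr (Or.inl hp))
        · intro p hp
          rcases List.mem_cons.mp hp with h | h
          · exact h ▸ A2 pt (List.mem_append.mpr (Or.inr (by simp)))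
          · exact A3 p (List.mem_cons_of_mem _ (List.mem_cons_of_mem _ h))

-- The loop's result has exactly the six closed-form images as members.
theorem weylLoop_members (a b : Int) (p : Int × Int) :
    p ∈ weylLoop 13 PySem.Set.empty [(a, b)] ↔ p ∈ sixList a b := by
  obtain ⟨A1, A2, A3, A4, A5⟩ := weylLoop_main a b 13 PySem.Set.empty [(a, b)]
    (by simp [PySem.Set.empty]) (by simp [PySem.Set.empty])
    (by intro q hq; simp at hq; subst hq; exact List.mem_cons_self)
    (by simp [PySem.Set.empty]) (by simp [PySem.Set.empty]) (by simp [PySem.Set.empty])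
  constructor
  · exact A4 p
  · intro hp
    have hab : (a, b) ∈ weylLoop 13 PySem.Set.empty [(a, b)] := A3 _ List.mem_cons_self
    have h1 : (-a, a + b) ∈ weylLoop 13 PySem.Set.empty [(a, b)] := (A5 _ hab).1
    have h2 : (a + b, -b) ∈ weylLoop 13 PySem.Set.empty [(a, b)] := (A5 _ hab).2
    have h21 : (b, -(a + b)) ∈ weylLoop 13 PySem.Set.empty [(a, b)] := by
      have := (A5 _ h1).2
      have e : s2pt (-a, a + b) = (b, -(a + b)) := by
        simp [s2pt, weyl_reflect_s2]
      rwa [e] at this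
    have h12 : (-(a + b), a) ∈ weylLoop 13 PySem.Set.empty [(a, b)] := by
      have := (A5 _ h2).1
      have e : s1pt (a + b, -b) = (-(a + b), a) := by
        simp [s1pt, weyl_reflect_s1]
      rwa [e] at this
    have h121 : (-b, -a) ∈ weylLoop 13 PySem.Set.empty [(a, b)] := by
      have := (A5 _ h21).1
      have e : s1pt (b, -(a + b)) = (-b, -a) := by
        simp [s1pt, weyl_reflect_s1]
      rwa [e] at this
    rw [mem_sixList_iff] at hp
    rcases hp with h | h | h | h | h | h <;> subst h
    · exact hab
    · exact h1
    · exact h2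
    · have e : ((-a - b : Int), a) = (-(a + b), a) := by simp [Prod.ext_iff]; omega
      rw [e]; exact h12
    · have e : ((b : Int), -a - b) = (b, -(a + b)) := by simp [Prod.ext_iff]; omega
      rw [e]; exact h21
    · exact h121

theorem weylLoop_perm (a b : Int) :
    (weylLoop 13 PySem.Set.empty [(a, b)]).Perm (PySem.Set.ofList (sixList a b)) := by
  obtain ⟨A1, _, _, _, _⟩ := weylLoop_main a b 13 PySem.Set.empty [(a, b)]
    (by simp [PySem.Set.empty]) (by simp [PySem.Set.empty])
    (by intro q hq; simp at hq; subst hq; exact List.mem_cons_self)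
    (by simp [PySem.Set.empty]) (by simp [PySem.Set.empty]) (by simp [PySem.Set.empty])
  rw [List.perm_ext_iff_of_nodup A1 (PySem.Set.nodup_ofList _)]
  intro p
  rw [weylLoop_members, PySem.Set.mem_ofList]

-- ===== VERDICT (by name: the statement is the Claim_ definition above) =====
theorem weyl_orbit_spec : Claim_equal_weyl_orbit := by
  intro a b _
  unfold Spec_weyl_orbit weyl_orbit weyl_orbit_alt
  have h := weylLoop_perm a b
  obtain ⟨A1, _, _, _, _⟩ := weylLoop_main a b 13 PySem.Set.empty [(a, b)]
    (by simp [PySem.Set.empty]) (by simp [PySem.Set.empty])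
    (by intro q hq; simp at hq; subst hq; exact List.mem_cons_self)
    (by simp [PySem.Set.empty]) (by simp [PySem.Set.empty]) (by simp [PySem.Set.empty])
  exact sorted2_eq_of_perm _ _ h A1
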